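-- pv_equiv track=rewrite | github.com/grapheneaffiliate/h4-polytopic-attention | solve_arc_b18.py | solve_b60334d2
-- ===== SOURCE A (Python) =====
-- def solve_b60334d2(grid):
--     """Each 5 gets a plus pattern: diagonals get 5, orthogonals get 1, center becomes 0."""
--     rows = len(grid)
--     cols = len(grid[0])
--     out = [[0]*cols for _ in range(rows)]
--
--     for r in range(rows):
--         for c in range(cols):
--             if grid[r][c] == 5:
--                 for dr in [-1, 0, 1]:
--                     for dc in [-1, 0, 1]:
--                         nr, nc = r + dr, c + dc
--                         if 0 <= nr < rows and 0 <= nc < cols: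
--                             if dr == 0 and dc == 0:
--                                 pass
--                             elif dr == 0 or dc == 0:
--                                 out[nr][nc] = 1
--                             else:
--                                 out[nr][nc] = 5
--
--     return out
-- ===== SOURCE B (Python) =====
-- def solve_b60334d2(grid):
--     """Gather formulation: each output cell scans its 8 neighbors in row-major
--     order and takes the value dictated by the last neighboring 5 (last wins)."""
--     rows = len(grid)
--     cols = len(grid[0])
--
--     def cell(r, c):
--         v = 0
--         for a in (-1, 0, 1):
--             for b in (-1, 0, 1):
--                 if a == 0 and b == 0:
--                     continue
--                 nr, nc = r + a, c + b
--                 if 0 <= nr < rows and 0 <= nc < cols and grid[nr][nc] == 5: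
--                     v = 1 if (a == 0 or b == 0) else 5
--         return v
--
--     return [[cell(r, c) for c in range(cols)] for r in range(rows)]
-- ===== Notes on version B (the rewrite author's own statement) =====
-- stated objective: alternative
-- what changed: A scatters a plus/diagonal stamp from every 5-cell into a mutable zero grid (last write wins); B builds the output functionally by a gather: each output cell independently scans its 8 neighbors in row-major order and takes the value dictated by the last neighboring 5.
import Mathlib
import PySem

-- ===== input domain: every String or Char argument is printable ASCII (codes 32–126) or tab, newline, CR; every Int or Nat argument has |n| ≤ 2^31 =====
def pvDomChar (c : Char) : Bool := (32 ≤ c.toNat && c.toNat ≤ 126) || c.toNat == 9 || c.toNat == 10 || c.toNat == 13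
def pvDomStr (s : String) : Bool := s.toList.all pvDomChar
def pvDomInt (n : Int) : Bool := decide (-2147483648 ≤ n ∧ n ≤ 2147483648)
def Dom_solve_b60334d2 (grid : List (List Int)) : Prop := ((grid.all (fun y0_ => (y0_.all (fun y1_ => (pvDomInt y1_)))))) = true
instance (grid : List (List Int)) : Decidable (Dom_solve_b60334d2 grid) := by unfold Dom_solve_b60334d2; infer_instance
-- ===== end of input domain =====

-- B rebuilds the output by a gather (each cell scans its 8 neighbors, last row-major 5 wins)
-- instead of A's scatter of plus/diagonal stamps into a mutable grid; objective: alternative.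

-- ===== PORT A =====
-- grid[i][j]; callers only use it with indices that are in range under Pre_, so the default is never hit
def pvAt (grid : List (List Int)) (i j : Int) : Int :=
  PySem.List.pyGetD (PySem.List.pyGetD grid i []) j 0

-- out[nr][nc] = v; callers guard 0 ≤ nr < len(out) and 0 ≤ nc < len(row), so List.set is exact
def pvSet2 (out : List (List Int)) (nr nc : Int) (v : Int) : List (List Int) :=
  out.set nr.toNat ((out.getD nr.toNat []).set nc.toNat v)

-- the body of A's innermost double loop over (dr, dc)
def pvStampStep (rows cols r c dr dc : Int) (out : List (List Int)) : List (List Int) :=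
  if 0 ≤ r + dr ∧ r + dr < rows ∧ 0 ≤ c + dc ∧ c + dc < cols then
    if dr = 0 ∧ dc = 0 then out
    else if dr = 0 ∨ dc = 0 then pvSet2 out (r + dr) (c + dc) 1
    else pvSet2 out (r + dr) (c + dc) 5
  else out

def pvStamp (rows cols r c : Int) (out : List (List Int)) : List (List Int) :=
  ([-1, 0, 1] : List Int).foldl (fun out dr =>
    ([-1, 0, 1] : List Int).foldl (fun out dc =>
      pvStampStep rows cols r c dr dc out) out) out

def solve_b60334d2 (grid : List (List Int)) : List (List Int) :=
  let rows : Int := (grid.length : Int)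
  -- cols = len(grid[0]); Pre_ excludes grid = [] where Python raises IndexError
  let cols : Int := (((PySem.List.pyGet? grid 0).getD []).length : Int)
  let out0 : List (List Int) := (PySem.List.pyRange 0 rows).map (fun _ => List.replicate cols.toNat 0)
  (PySem.List.pyRange 0 rows).foldl (fun out r =>
    (PySem.List.pyRange 0 cols).foldl (fun out c =>
      if pvAt grid r c = 5 then pvStamp rows cols r c out else out) out) out0

-- ===== PORT B =====
-- the guarded neighbor test of B: overwrite v when the neighbor (i+a, j+b) exists and holds a 5
def pvHit (grid : List (List Int)) (rows cols i j a b : Int) (v : Int) : Int :=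
  if 0 ≤ i + a ∧ i + a < rows ∧ 0 ≤ j + b ∧ j + b < cols ∧ pvAt grid (i + a) (j + b) = 5 then
    (if a = 0 ∨ b = 0 then 1 else 5)
  else v

-- the body of B's innermost double loop over (a, b) ('continue' on the center)
def pvCellStep (grid : List (List Int)) (rows cols i j : Int) (v a b : Int) : Int :=
  if a = 0 ∧ b = 0 then v else pvHit grid rows cols i j a b v

def pvCell (grid : List (List Int)) (rows cols i j : Int) : Int :=
  ([-1, 0, 1] : List Int).foldl (fun v a =>
    ([-1, 0, 1] : List Int).foldl (fun v b =>
      pvCellStep grid rows cols i j v a b) v) 0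

def solve_b60334d2_alt (grid : List (List Int)) : List (List Int) :=
  let rows : Int := (grid.length : Int)
  -- cols = len(grid[0]); Pre_ excludes grid = [] where Python raises IndexError
  let cols : Int := (((PySem.List.pyGet? grid 0).getD []).length : Int)
  (PySem.List.pyRange 0 rows).map (fun r =>
    (PySem.List.pyRange 0 cols).map (fun c => pvCell grid rows cols r c))

-- ===== PRECONDITION & SPEC =====
-- Pre_ excludes exactly the inputs where Python A raises IndexError: the empty grid (len(grid[0]))
-- and grids with a row shorter than the first row (grid[r][c] for c < len(grid[0])).
def Pre_solve_b60334d2 (grid : List (List Int)) : Prop :=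
  grid ≠ [] ∧ ∀ row ∈ grid, (grid.headD []).length ≤ row.length
instance (grid : List (List Int)) : Decidable (Pre_solve_b60334d2 grid) := by
  unfold Pre_solve_b60334d2; infer_instance
def pvWitness_solve_b60334d2 : List (List Int) := [[5, 0], [0, 0]]

def Spec_solve_b60334d2 (grid : List (List Int)) (out : List (List Int)) : Prop := out = solve_b60334d2_alt grid
instance (grid : List (List Int)) (out : List (List Int)) : Decidable (Spec_solve_b60334d2 grid out) := by unfold Spec_solve_b60334d2; infer_instance

-- ===== CLAIM (what is proved, stated in full; the proofs are below) =====
def Claim_equal_solve_b60334d2 : Prop := ∀ (grid : List (List Int)), Dom_solve_b60334d2 grid → Pre_solve_b60334d2 grid → Spec_solve_b60334d2 grid (solve_b60334d2 grid)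

-- ===== LEMMAS AND PROOFS =====

-- shape invariant of A's mutable output: n rows, each of length m
def pvSh (n m : Nat) (out : List (List Int)) : Prop :=
  out.length = n ∧ ∀ row ∈ out, row.length = m

-- read out[p][q] (both indices known to be in range where used)
def pvGet (out : List (List Int)) (p q : Nat) : Int :=
  (out.getD p []).getD q 0

-- the value cell (i, j) holds after A stamps source (r, c), as an update of its previous value acc
def pvHitVal (r c i j acc : Int) : Int :=
  if r - 1 ≤ i ∧ i ≤ r + 1 ∧ c - 1 ≤ j ∧ j ≤ c + 1 ∧ ¬(i = r ∧ j = c) then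
    (if i = r ∨ j = c then 1 else 5)
  else acc

-- the per-source transition of cell (i, j) in A's scan over sources (r, c)
def pvG (grid : List (List Int)) (i j acc r c : Int) : Int :=
  if pvAt grid r c = 5 then pvHitVal r c i j acc else acc

-- a fold step guarded by 0 ≤ k < N (the form the window lemma produces)
def pvGd (N : Int) (f : Int → Int → Int) (acc k : Int) : Int :=
  if 0 ≤ k ∧ k < N then f acc k else acc

lemma pvSh_set2 {n m : Nat} {out : List (List Int)} (hsh : pvSh n m out)
    (nr nc : Int) (v : Int) (h2 : nr.toNat < n) :
    pvSh n m (pvSet2 out nr nc v) := by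
  constructor
  · rw [pvSet2, List.length_set]; exact hsh.1
  · intro row hrow
    rcases List.mem_or_eq_of_mem_set hrow with h | h
    · exact hsh.2 row h
    · subst h
      rw [List.length_set]
      have hlt : nr.toNat < out.length := by rw [hsh.1]; exact h2
      rw [List.getD_eq_getElem _ _ hlt]
      exact hsh.2 _ (List.getElem_mem hlt)

lemma pvGet_set2 {n m : Nat} {out : List (List Int)} (hsh : pvSh n m out)
    {nr nc : Int} (h1 : 0 ≤ nr) (h2 : nr < (n : Int)) (h3 : 0 ≤ nc) (h4 : nc < (m : Int))
    (v : Int) {p q : Nat} (hp : p < n) (hq : q < m) :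
    pvGet (pvSet2 out nr nc v) p q = if nr = (p : Int) ∧ nc = (q : Int) then v else pvGet out p q := by
  obtain ⟨i, rfl⟩ : ∃ i : Nat, nr = (i : Int) := ⟨nr.toNat, by omega⟩
  obtain ⟨j, rfl⟩ : ∃ j : Nat, nc = (j : Int) := ⟨nc.toNat, by omega⟩
  have hi : i < n := by exact_mod_cast h2
  have hj : j < m := by exact_mod_cast h4
  have hi' : i < out.length := by rw [hsh.1]; exact hi
  have hrowlen : (out.getD i []).length = m := by
    rw [List.getD_eq_getElem _ _ hi']; exact hsh.2 _ (List.getElem_mem hi')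
  have hset : ∀ (l : List (List Int)) (i p : Nat) (a d : List Int), i < l.length →
      (l.set i a).getD p d = if i = p then a else l.getD p d := by
    intro l i p a d h
    by_cases hip : i = p
    · subst hip; simp [List.getD_eq_getElem?_getD, h]
    · simp [List.getD_eq_getElem?_getD, hip]
  have hsetI : ∀ (l : List Int) (i p : Nat) (a d : Int), i < l.length →
      (l.set i a).getD p d = if i = p then a else l.getD p d := by
    intro l i p a d h
    by_cases hip : i = p
    · subst hip; simp [List.getD_eq_getElem?_getD, h]
    · simp [List.getD_eq_getElem?_getD, hip]
  simp only [pvGet, pvSet2, Int.toNat_natCast]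
  rw [hset out i p _ [] hi']
  by_cases hip : i = p
  · subst hip
    rw [if_pos rfl, hsetI _ j q v 0 (by rw [hrowlen]; exact hj)]
    by_cases hjq : j = q
    · subst hjq; rw [if_pos rfl, if_pos ⟨rfl, rfl⟩]
    · rw [if_neg hjq, if_neg (by intro h; exact hjq (by exact_mod_cast h.2))]
  · rw [if_neg hip, if_neg (by intro h; exact hip (by exact_mod_cast h.1))]

lemma pvSh_stampStep {n m : Nat} {out : List (List Int)} (hsh : pvSh n m out)
    (r c dr dc : Int) :
    pvSh n m (pvStampStep (n : Int) (m : Int) r c dr dc out) := by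
  unfold pvStampStep
  split_ifs with h1 h2 h3
  · exact hsh
  · exact pvSh_set2 hsh _ _ _ (by omega)
  · exact pvSh_set2 hsh _ _ _ (by omega)
  · exact hsh

lemma pvGet_stampStep {n m : Nat} {out : List (List Int)} (hsh : pvSh n m out)
    (r c dr dc : Int) {p q : Nat} (hp : p < n) (hq : q < m) :
    pvGet (pvStampStep (n : Int) (m : Int) r c dr dc out) p q =
      if (p : Int) = r + dr ∧ (q : Int) = c + dc ∧ ¬(dr = 0 ∧ dc = 0) then
        (if dr = 0 ∨ dc = 0 then 1 else 5)
      else pvGet out p q := by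
  have hpn : (p : Int) < (n : Int) := by exact_mod_cast hp
  have hqm : (q : Int) < (m : Int) := by exact_mod_cast hq
  unfold pvStampStep
  by_cases h1 : 0 ≤ r + dr ∧ r + dr < (n : Int) ∧ 0 ≤ c + dc ∧ c + dc < (m : Int)
  · rw [if_pos h1]
    by_cases h2 : dr = 0 ∧ dc = 0
    · rw [if_pos h2, if_neg (by omega)]
    · rw [if_neg h2]
      by_cases h3 : dr = 0 ∨ dc = 0
      · rw [if_pos h3, pvGet_set2 hsh (by omega) (by omega) (by omega) (by omega) _ hp hq]
        split_ifs <;> first | rfl | omega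
      · rw [if_neg h3, pvGet_set2 hsh (by omega) (by omega) (by omega) (by omega) _ hp hq]
        split_ifs <;> first | rfl | omega
  · rw [if_neg h1, if_neg (by omega)]

lemma pvSh_stamp {n m : Nat} {out : List (List Int)} (hsh : pvSh n m out) (r c : Int) :
    pvSh n m (pvStamp (n : Int) (m : Int) r c out) := by
  simp only [pvStamp, List.foldl_cons, List.foldl_nil]
  exact pvSh_stampStep (pvSh_stampStep (pvSh_stampStep (pvSh_stampStep (pvSh_stampStep
    (pvSh_stampStep (pvSh_stampStep (pvSh_stampStep (pvSh_stampStep hsh r c (-1) (-1))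
    r c (-1) 0) r c (-1) 1) r c 0 (-1)) r c 0 0) r c 0 1) r c 1 (-1)) r c 1 0) r c 1 1

set_option maxHeartbeats 2000000 in
lemma pvGet_stamp {n m : Nat} {out : List (List Int)} (hsh : pvSh n m out)
    (r c : Int) {p q : Nat} (hp : p < n) (hq : q < m) :
    pvGet (pvStamp (n : Int) (m : Int) r c out) p q = pvHitVal r c (p : Int) (q : Int) (pvGet out p q) := by
  have s0 := hsh
  have s1 := pvSh_stampStep s0 r c (-1) (-1)
  have s2 := pvSh_stampStep s1 r c (-1) 0
  have s3 := pvSh_stampStep s2 r c (-1) 1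
  have s4 := pvSh_stampStep s3 r c 0 (-1)
  have s5 := pvSh_stampStep s4 r c 0 0
  have s6 := pvSh_stampStep s5 r c 0 1
  have s7 := pvSh_stampStep s6 r c 1 (-1)
  have s8 := pvSh_stampStep s7 r c 1 0
  simp only [pvStamp, List.foldl_cons, List.foldl_nil]
  rw [pvGet_stampStep s8 r c 1 1 hp hq, pvGet_stampStep s7 r c 1 0 hp hq,
    pvGet_stampStep s6 r c 1 (-1) hp hq, pvGet_stampStep s5 r c 0 1 hp hq,
    pvGet_stampStep s4 r c 0 0 hp hq, pvGet_stampStep s3 r c 0 (-1) hp hq,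
    pvGet_stampStep s2 r c (-1) 1 hp hq, pvGet_stampStep s1 r c (-1) 0 hp hq,
    pvGet_stampStep s0 r c (-1) (-1) hp hq]
  unfold pvHitVal
  split_ifs <;> first | rfl | omega | ((exfalso; norm_num at *) <;> omega)

-- A's inner loop over a list of column indices, seen from one cell (p, q)
lemma pvLoopC {n m : Nat} (grid : List (List Int)) (r : Int) (C : List Int) :
    ∀ (out : List (List Int)), pvSh n m out →
      pvSh n m (C.foldl (fun out c => if pvAt grid r c = 5 then pvStamp (n : Int) (m : Int) r c out else out) out)
      ∧ ∀ (p q : Nat), p < n → q < m →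
          pvGet (C.foldl (fun out c => if pvAt grid r c = 5 then pvStamp (n : Int) (m : Int) r c out else out) out) p q
            = C.foldl (fun acc c => pvG grid (p : Int) (q : Int) acc r c) (pvGet out p q) := by
  induction C with
  | nil => exact fun out hsh => ⟨hsh, fun p q hp hq => rfl⟩
  | cons c C ih =>
    intro out hsh
    simp only [List.foldl_cons]
    have hsh' : pvSh n m (if pvAt grid r c = 5 then pvStamp (n : Int) (m : Int) r c out else out) := by
      split_ifs
      · exact pvSh_stamp hsh r c
      · exact hsh
    refine ⟨(ih _ hsh').1, fun p q hp hq => ?_⟩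
    rw [(ih _ hsh').2 p q hp hq]
    congr 1
    unfold pvG
    split_ifs with h5
    · exact pvGet_stamp hsh r c hp hq
    · rfl

-- A's outer loop over a list of row indices, seen from one cell (p, q)
lemma pvLoopR {n m : Nat} (grid : List (List Int)) (R : List Int) :
    ∀ (out : List (List Int)), pvSh n m out →
      pvSh n m (R.foldl (fun out r =>
          (PySem.List.pyRange 0 (m : Int)).foldl (fun out c => if pvAt grid r c = 5 then pvStamp (n : Int) (m : Int) r c out else out) out) out)
      ∧ ∀ (p q : Nat), p < n → q < m →
          pvGet (R.foldl (fun out r =>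
              (PySem.List.pyRange 0 (m : Int)).foldl (fun out c => if pvAt grid r c = 5 then pvStamp (n : Int) (m : Int) r c out else out) out) out) p q
            = R.foldl (fun acc r =>
                (PySem.List.pyRange 0 (m : Int)).foldl (fun acc c => pvG grid (p : Int) (q : Int) acc r c) acc) (pvGet out p q) := by
  induction R with
  | nil => exact fun out hsh => ⟨hsh, fun p q hp hq => rfl⟩
  | cons r R ih =>
    intro out hsh
    simp only [List.foldl_cons]
    have h := pvLoopC (n := n) (m := m) grid r (PySem.List.pyRange 0 (m : Int)) out hsh
    refine ⟨(ih _ h.1).1, fun p q hp hq => ?_⟩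
    rw [(ih _ h.1).2 p q hp hq, h.2 p q hp hq]

lemma pvGd_pos {N : Int} {k : Int} (h : 0 ≤ k ∧ k < N) (f : Int → Int → Int) (acc : Int) :
    pvGd N f acc k = f acc k := by
  simp only [pvGd]; rw [if_pos h]

lemma pvGd_neg {N : Int} {k : Int} (h : ¬(0 ≤ k ∧ k < N)) (f : Int → Int → Int) (acc : Int) :
    pvGd N f acc k = acc := by
  simp only [pvGd]; rw [if_neg h]

-- collapsing a fold over range(0, N) to its (at most three) non-identity steps around t
lemma pvWindow (N t : Int) (f : Int → Int → Int) (h0 : 0 ≤ t) (hN : t < N)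
    (hid : ∀ acc k, ¬(t - 1 ≤ k ∧ k ≤ t + 1) → f acc k = acc) (acc : Int) :
    (PySem.List.pyRange 0 N).foldl f acc = pvGd N f (pvGd N f (pvGd N f acc (t - 1)) t) (t + 1) := by
  have hid' : ∀ (L : List Int) (acc : Int), (∀ k ∈ L, ¬(t - 1 ≤ k ∧ k ≤ t + 1)) →
      L.foldl f acc = acc := by
    intro L acc h
    rw [PySem.List.foldl_congr_mem L f (fun acc _ => acc) acc (fun acc k hk => hid acc k (h k hk))]
    exact PySem.List.foldl_ignore L acc
  have front : ∀ acc : Int, (PySem.List.pyRange 0 t).foldl f acc = pvGd N f acc (t - 1) := by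
    intro acc
    by_cases h1 : 1 ≤ t
    · rw [PySem.List.pyRange_one_append 0 (t - 1) t (by omega) (by omega), List.foldl_append,
        hid' (PySem.List.pyRange 0 (t - 1)) acc
          (by intro k hk; rw [PySem.List.mem_pyRange_one] at hk; omega),
        PySem.List.pyRange_one_cons (show t - 1 < t by omega),
        show t - 1 + 1 = t from by ring, PySem.List.pyRange_one_eq_nil (le_refl t)]
      simp only [List.foldl_cons, List.foldl_nil]
      rw [pvGd_pos (by omega)]
    · rw [PySem.List.pyRange_one_eq_nil (by omega : t ≤ 0), List.foldl_nil,
        pvGd_neg (by omega)]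
  have tail : ∀ acc : Int, (PySem.List.pyRange (t + 1) N).foldl f acc = pvGd N f acc (t + 1) := by
    intro acc
    by_cases h2 : t + 2 ≤ N
    · rw [PySem.List.pyRange_one_cons (show t + 1 < N by omega), List.foldl_cons,
        hid' (PySem.List.pyRange (t + 1 + 1) N) (f acc (t + 1))
          (by intro k hk; rw [PySem.List.mem_pyRange_one] at hk; omega),
        pvGd_pos (by omega)]
    · rw [PySem.List.pyRange_one_eq_nil (by omega : N ≤ t + 1), List.foldl_nil,
        pvGd_neg (by omega)]
  rw [PySem.List.pyRange_one_append 0 t N h0 (le_of_lt hN), List.foldl_append,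
    PySem.List.pyRange_one_cons hN, List.foldl_cons, front, tail]
  congr 1
  rw [pvGd_pos ⟨h0, hN⟩]

lemma pvCellStep_id (grid : List (List Int)) {n : Nat} (a i : Int)
    (hg : ¬(0 ≤ i + a ∧ i + a < (n : Int))) :
    ∀ (m j v b : Int), pvCellStep grid (n : Int) m i j v a b = v := by
  intro m j v b
  unfold pvCellStep pvHit
  split_ifs <;> first | rfl | omega

lemma pvColEq (grid : List (List Int)) {n m p q : Nat} (hp : p < n) (hq : q < m)
    (a : Int) (hg : 0 ≤ (p : Int) + a ∧ (p : Int) + a < (n : Int)) (ha1 : -1 ≤ a) (ha2 : a ≤ 1)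
    (b c : Int) (hc : c = (q : Int) + b) (hb1 : -1 ≤ b) (hb2 : b ≤ 1) (acc : Int) :
    pvGd (m : Int) (fun acc c => pvG grid (p : Int) (q : Int) acc ((p : Int) + a) c) acc c
      = pvCellStep grid (n : Int) (m : Int) (p : Int) (q : Int) acc a b := by
  subst hc
  have hpn : (p : Int) < (n : Int) := by exact_mod_cast hp
  have hqm : (q : Int) < (m : Int) := by exact_mod_cast hq
  by_cases h5 : pvAt grid ((p : Int) + a) ((q : Int) + b) = 5 <;>
    · simp only [pvGd, pvG, pvHitVal, pvCellStep, pvHit, h5]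
      split_ifs <;> first | rfl | omega | ((exfalso; norm_num at *) <;> omega)

lemma pvRowEq (grid : List (List Int)) {n m p q : Nat} (hp : p < n) (hq : q < m)
    (a r : Int) (hr : r = (p : Int) + a) (ha1 : -1 ≤ a) (ha2 : a ≤ 1) (acc : Int) :
    pvGd (n : Int)
      (fun acc r =>
        pvGd (m : Int) (fun acc c => pvG grid (p : Int) (q : Int) acc r c)
          (pvGd (m : Int) (fun acc c => pvG grid (p : Int) (q : Int) acc r c)
            (pvGd (m : Int) (fun acc c => pvG grid (p : Int) (q : Int) acc r c) acc ((q : Int) - 1)) (q : Int))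
          ((q : Int) + 1)) acc r
      = pvCellStep grid (n : Int) (m : Int) (p : Int) (q : Int)
          (pvCellStep grid (n : Int) (m : Int) (p : Int) (q : Int)
            (pvCellStep grid (n : Int) (m : Int) (p : Int) (q : Int) acc a (-1)) a 0) a 1 := by
  subst hr
  by_cases hg : 0 ≤ (p : Int) + a ∧ (p : Int) + a < (n : Int)
  · rw [pvGd_pos hg]
    rw [pvColEq grid hp hq a hg ha1 ha2 (-1) ((q : Int) - 1) (by ring) (by norm_num) (by norm_num),
      pvColEq grid hp hq a hg ha1 ha2 0 ((q : Int)) (by ring) (by norm_num) (by norm_num),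
      pvColEq grid hp hq a hg ha1 ha2 1 ((q : Int) + 1) (by ring) (by norm_num) (by norm_num)]
  · rw [pvGd_neg hg]
    simp only [pvCellStep_id grid a ((p : Int)) hg]

-- the heart of the proof: A's whole scatter scan, read at one cell, is B's gather at that cell
lemma pvCellMain (grid : List (List Int)) {n m p q : Nat} (hp : p < n) (hq : q < m) :
    (PySem.List.pyRange 0 (n : Int)).foldl (fun acc r =>
        (PySem.List.pyRange 0 (m : Int)).foldl (fun acc c => pvG grid (p : Int) (q : Int) acc r c) acc) 0
      = pvCell grid (n : Int) (m : Int) (p : Int) (q : Int) := by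
  have hpn : (p : Int) < (n : Int) := by exact_mod_cast hp
  have hqm : (q : Int) < (m : Int) := by exact_mod_cast hq
  have hinner : ∀ (r acc : Int),
      List.foldl (fun acc c => pvG grid (p : Int) (q : Int) acc r c) acc (PySem.List.pyRange 0 (m : Int))
        = pvGd (m : Int) (fun acc c => pvG grid (p : Int) (q : Int) acc r c)
            (pvGd (m : Int) (fun acc c => pvG grid (p : Int) (q : Int) acc r c)
              (pvGd (m : Int) (fun acc c => pvG grid (p : Int) (q : Int) acc r c) acc ((q : Int) - 1))
              ((q : Int)))
            ((q : Int) + 1) := by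
    intro r acc
    refine pvWindow (m : Int) (q : Int) _ (by positivity) hqm ?_ acc
    intro acc c hcw
    simp only [pvG, pvHitVal]
    split_ifs <;> first | rfl | omega
  simp only [hinner]
  have hidout : ∀ (acc r : Int), ¬((p : Int) - 1 ≤ r ∧ r ≤ (p : Int) + 1) →
      pvGd (m : Int) (fun acc c => pvG grid (p : Int) (q : Int) acc r c)
        (pvGd (m : Int) (fun acc c => pvG grid (p : Int) (q : Int) acc r c)
          (pvGd (m : Int) (fun acc c => pvG grid (p : Int) (q : Int) acc r c) acc ((q : Int) - 1))
          ((q : Int)))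
        ((q : Int) + 1) = acc := by
    intro acc r hr
    have hG : ∀ (acc c : Int), pvG grid (p : Int) (q : Int) acc r c = acc := by
      intro acc c
      simp only [pvG, pvHitVal]
      split_ifs <;> first | rfl | omega
    simp only [pvGd, hG, ite_self]
  rw [pvWindow ((n : Int)) ((p : Int)) _ (by positivity) hpn hidout 0]
  rw [pvRowEq grid hp hq (-1) ((p : Int) - 1) (by ring) (by norm_num) (by norm_num),
    pvRowEq grid hp hq 0 ((p : Int)) (by ring) (by norm_num) (by norm_num),
    pvRowEq grid hp hq 1 ((p : Int) + 1) (by ring) (by norm_num) (by norm_num)]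
  simp only [pvCell, List.foldl_cons, List.foldl_nil]

lemma pvOut0 (n m : Nat) :
    pvSh n m ((PySem.List.pyRange 0 (n : Int)).map (fun _ => List.replicate ((m : Int)).toNat 0))
    ∧ ∀ (p q : Nat), p < n →
        pvGet ((PySem.List.pyRange 0 (n : Int)).map (fun _ => List.replicate ((m : Int)).toNat 0)) p q = 0 := by
  refine ⟨⟨?_, ?_⟩, ?_⟩
  · rw [List.length_map, PySem.List.pyRange_zero_natCast, List.length_map, List.length_range]
  · intro row hrow
    rw [List.mem_map] at hrow
    obtain ⟨_, _, rfl⟩ := hrow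
    simp
  · intro p q hp
    have hrow : ((PySem.List.pyRange 0 (n : Int)).map
        (fun _ => List.replicate ((m : Int)).toNat (0 : Int))).getD p []
          = List.replicate ((m : Int)).toNat (0 : Int) := by
      rw [List.getD_eq_getElem _ _ (by
          rw [List.length_map, PySem.List.pyRange_zero_natCast, List.length_map, List.length_range]
          exact hp), List.getElem_map]
    unfold pvGet
    simp only [hrow]
    rw [List.getD_eq_getElem?_getD, List.getElem?_replicate]
    split_ifs <;> rfl

lemma pvGet_eq_getElem {out : List (List Int)}
    {p q : Nat} (h1 : p < out.length) (h2 : q < (out[p]'h1).length) :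
    pvGet out p q = (out[p]'h1)[q]'h2 := by
  unfold pvGet
  rw [List.getD_eq_getElem _ _ h1, List.getD_eq_getElem _ _ h2]

-- ===== VERDICT (by name: the statement is the Claim_ definition above) =====
theorem solve_b60334d2_spec : Claim_equal_solve_b60334d2 := by
  intro grid _ _
  unfold Spec_solve_b60334d2
  show solve_b60334d2 grid = solve_b60334d2_alt grid
  simp only [solve_b60334d2, solve_b60334d2_alt]
  obtain ⟨hsh0, hget0⟩ := pvOut0 grid.length ((PySem.List.pyGet? grid 0).getD []).length
  obtain ⟨hshF, hgetF⟩ := pvLoopR (n := grid.length) (m := ((PySem.List.pyGet? grid 0).getD []).length)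
    grid (PySem.List.pyRange 0 (grid.length : Int)) _ hsh0
  rw [show (PySem.List.pyRange 0 (grid.length : Int)).map
        (fun r => (PySem.List.pyRange 0 (((PySem.List.pyGet? grid 0).getD []).length : Int)).map
          (fun c => pvCell grid (grid.length : Int)
            (((PySem.List.pyGet? grid 0).getD []).length : Int) r c))
      = (List.range grid.length).map
        (fun (k : Nat) => (List.range ((PySem.List.pyGet? grid 0).getD []).length).map
          (fun (j : Nat) => pvCell grid (grid.length : Int)
            (((PySem.List.pyGet? grid 0).getD []).length : Int) ((k : Int)) ((j : Int))))
      from by simp only [PySem.List.pyRange_zero_natCast, List.map_map]; rfl]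
  apply List.ext_getElem
  · rw [hshF.1, List.length_map, List.length_range]
  · intro i h1 h2
    have hiN : i < grid.length := by have h := h1; rw [hshF.1] at h; exact h
    have hrowlen := hshF.2 _ (List.getElem_mem h1)
    apply List.ext_getElem
    · rw [hrowlen, List.getElem_map, List.length_map, List.length_range]
    · intro j h3 h4
      have hjM : j < ((PySem.List.pyGet? grid 0).getD []).length := by
        have h := h3; rw [hrowlen] at h; exact h
      rw [← pvGet_eq_getElem h1 h3, hgetF i j hiN hjM, hget0 i j hiN,
        pvCellMain grid hiN hjM]
      simp only [List.getElem_map, List.getElem_range]
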